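-- pv_equiv track=rewrite | github.com/Nikitosova/Final-project-2023 | help_funcs.py | enumerate_words
-- ===== SOURCE A (Python) =====
-- def enumerate_words(lists_of_keywords):
--     i = 0
--     words_indices = {}
--     for keywords in lists_of_keywords:
--         for word in keywords:
--             if word not in words_indices:
--                 words_indices[word] = i
--                 i += 1
--
--     return words_indices
-- ===== SOURCE B (Python) =====
-- def enumerate_words(lists_of_keywords):
--     flat = [word for keywords in lists_of_keywords for word in keywords]
--     return {word: len(set(flat[:p])) for p, word in enumerate(flat) if word not in flat[:p]}
-- ===== Notes on version B (the rewrite author's own statement) =====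
-- stated objective: alternative
-- what changed: Removes the running counter and incrementally-built dict: B flattens the words and computes each word's index statelessly as the number of distinct words in the flattened prefix before its first occurrence, selecting first occurrences with a prefix-membership filter.
import Mathlib
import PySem

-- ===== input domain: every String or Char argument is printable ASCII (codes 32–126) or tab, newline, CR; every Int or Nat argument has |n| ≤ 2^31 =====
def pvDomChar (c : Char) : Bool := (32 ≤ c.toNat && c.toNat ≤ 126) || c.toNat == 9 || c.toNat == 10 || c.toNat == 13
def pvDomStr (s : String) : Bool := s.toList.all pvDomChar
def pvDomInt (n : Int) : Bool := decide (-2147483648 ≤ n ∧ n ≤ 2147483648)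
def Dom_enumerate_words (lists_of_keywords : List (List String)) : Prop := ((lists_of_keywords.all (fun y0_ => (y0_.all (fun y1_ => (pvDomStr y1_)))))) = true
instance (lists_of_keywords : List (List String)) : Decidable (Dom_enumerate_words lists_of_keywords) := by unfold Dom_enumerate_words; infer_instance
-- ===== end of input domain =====

-- B replaces A's running counter and incrementally-built dict by a stateless per-position
-- computation (index = number of distinct words in the flattened prefix before the first
-- occurrence); objective: alternative (same result, different algorithm, not faster).

-- ===== PORT A =====
-- A: running counter + dict, inserting each unseen word with the next index.
def enumerate_words (lists_of_keywords : List (List String)) : List (String × Int) :=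
  (lists_of_keywords.foldl
    (fun st keywords =>
      keywords.foldl
        (fun st word =>
          if st.2.contains word then st
          else (st.1 + 1, st.2.insert word st.1))
        st)
    ((0 : Int), (PySem.Dict.empty : PySem.Dict String Int))).2.items

-- ===== PORT B =====
-- B: flatten; then a dict comprehension keeps each word's FIRST position (filter
-- 'word not in flat[:p]') and maps it to len(set(flat[:p])), the number of distinct
-- words strictly before it.
def enumerate_words_alt (lists_of_keywords : List (List String)) : List (String × Int) :=
  let flat := lists_of_keywords.flatMap (fun keywords => keywords)
  ((PySem.List.enumerate flat 0).foldl
    (fun d pw =>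
      if (PySem.List.slice flat none (some pw.1)).contains pw.2 then d
      else d.insert pw.2 (PySem.Set.len (PySem.Set.ofList (PySem.List.slice flat none (some pw.1)))))
    (PySem.Dict.empty : PySem.Dict String Int)).items

-- ===== PRECONDITION & SPEC =====
def Spec_enumerate_words (lists_of_keywords : List (List String)) (out : List (String × Int)) : Prop := out = enumerate_words_alt lists_of_keywords
instance (lists_of_keywords : List (List String)) (out : List (String × Int)) : Decidable (Spec_enumerate_words lists_of_keywords out) := by unfold Spec_enumerate_words; infer_instance

-- ===== CLAIM (what is proved, stated in full; the proofs are below) =====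
def Claim_equal_enumerate_words : Prop := ∀ (lists_of_keywords : List (List String)), Dom_enumerate_words lists_of_keywords → Spec_enumerate_words lists_of_keywords (enumerate_words lists_of_keywords)

-- ===== LEMMAS AND PROOFS =====

-- the pairs both sides end up with, for an ordered-dedup list u
def pvPairs (u : List String) : List (String × Int) :=
  (PySem.List.enumerate u 0).map (fun p => (p.2, p.1))

theorem pvPairs_append_singleton (u : List String) (w : String) :
    pvPairs (u ++ [w]) = pvPairs u ++ [(w, (u.length : Int))] := by
  simp [pvPairs, PySem.List.enumerate_append, PySem.List.enumerate]

theorem pvKeys_mk_pairs (u : List String) :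
    (PySem.Dict.mk (pvPairs u)).keys = u := by
  have h := PySem.List.map_snd_enumerate u 0
  simp [PySem.Dict.keys, pvPairs]
  exact h

theorem pvContains_mk_pairs (u : List String) (w : String) :
    (PySem.Dict.mk (pvPairs u)).contains w = u.contains w := by
  by_cases h : w ∈ u
  · have : (PySem.Dict.mk (pvPairs u)).contains w = true := by
      rw [PySem.Dict.contains_iff_mem_keys, pvKeys_mk_pairs]; exact h
    simp [this, h]
  · have : ¬ (PySem.Dict.mk (pvPairs u)).contains w = true := by
      rw [PySem.Dict.contains_iff_mem_keys, pvKeys_mk_pairs]; exact h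
    simp only [Bool.not_eq_true] at this
    simp [this, h]

theorem pvInsert_mk_pairs (u : List String) (w : String) (h : w ∉ u) :
    (PySem.Dict.mk (pvPairs u)).insert w ((u.length : Nat) : Int)
      = PySem.Dict.mk (pvPairs (u ++ [w])) := by
  have h1 : u.contains w = false := by simpa using h
  have hc : (PySem.Dict.mk (pvPairs u)).contains w = false := by
    rw [pvContains_mk_pairs]; exact h1
  have hitems := PySem.Dict.items_insert_of_not_contains
    (PySem.Dict.mk (pvPairs u)) (k := w) (((u.length : Nat) : Int)) hc
  cases hd : (PySem.Dict.mk (pvPairs u)).insert w ((u.length : Nat) : Int) with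
  | mk l =>
    rw [hd] at hitems
    rw [pvPairs_append_singleton]
    exact congrArg PySem.Dict.mk hitems

-- A's loop invariant: the inner step over a word list ws, started from the state for a
-- dedup prefix u, lands on the state for foldl Set.add u ws
theorem pvLoop (ws u : List String) :
    ws.foldl
      (fun st word =>
        if st.2.contains word then st
        else (st.1 + 1, st.2.insert word st.1))
      (((u.length : Nat) : Int), PySem.Dict.mk (pvPairs u))
    = ((((ws.foldl PySem.Set.add u).length : Nat) : Int), PySem.Dict.mk (pvPairs (ws.foldl PySem.Set.add u))) := by
  induction ws generalizing u with
  | nil => rfl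
  | cons w ws ih =>
    simp only [List.foldl_cons]
    rw [pvContains_mk_pairs]
    by_cases h : w ∈ u
    · have h1 : u.contains w = true := by simpa using h
      have hadd : PySem.Set.add u w = u := by simp [PySem.Set.add, h]
      rw [h1, if_pos rfl, hadd]
      exact ih u
    · have h1 : u.contains w = false := by simpa using h
      have hadd : PySem.Set.add u w = u ++ [w] := by simp [PySem.Set.add, h]
      have hlen : ((u.length : Nat) : Int) + 1 = (((u ++ [w]).length : Nat) : Int) := by
        simp
      rw [h1, hadd, pvInsert_mk_pairs u w h, hlen]
      simp only [Bool.false_eq_true, if_false]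
      exact ih (u ++ [w])

-- B's comprehension over the flattened list ws builds exactly the dict of pvPairs (ofList ws)
theorem pvComp (ws : List String) :
    (PySem.List.enumerate ws 0).foldl
      (fun d pw =>
        if (PySem.List.slice ws none (some pw.1)).contains pw.2 then d
        else d.insert pw.2 (PySem.Set.len (PySem.Set.ofList (PySem.List.slice ws none (some pw.1)))))
      (PySem.Dict.empty : PySem.Dict String Int)
    = PySem.Dict.mk (pvPairs (PySem.Set.ofList ws)) := by
  induction ws using List.reverseRecOn with
  | nil => rfl
  | append_singleton ws w ih =>
    rw [PySem.List.enumerate_append, List.foldl_append]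
    -- over the old positions, slicing ws ++ [w] is slicing ws
    have hcongr :
        (PySem.List.enumerate ws 0).foldl
          (fun d pw =>
            if (PySem.List.slice (ws ++ [w]) none (some pw.1)).contains pw.2 then d
            else d.insert pw.2 (PySem.Set.len (PySem.Set.ofList (PySem.List.slice (ws ++ [w]) none (some pw.1)))))
          (PySem.Dict.empty : PySem.Dict String Int)
        = (PySem.List.enumerate ws 0).foldl
          (fun d pw =>
            if (PySem.List.slice ws none (some pw.1)).contains pw.2 then d
            else d.insert pw.2 (PySem.Set.len (PySem.Set.ofList (PySem.List.slice ws none (some pw.1)))))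
          (PySem.Dict.empty : PySem.Dict String Int) := by
      apply PySem.List.foldl_congr_mem
      intro d pw hmem
      rcases (PySem.List.mem_enumerate_iff ws 0 pw).mp hmem with ⟨k, hk, rfl⟩
      have hsl : PySem.List.slice (ws ++ [w]) none (some ((0 : Int) + (k : Int)))
          = PySem.List.slice ws none (some ((0 : Int) + (k : Int))) := by
        have : ((0 : Int) + (k : Int)) = ((k : Nat) : Int) := by ring
        rw [this, PySem.List.slice_to_natCast, PySem.List.slice_to_natCast,
          List.take_append_of_le_length (Nat.le_of_lt hk)]
      simp only [hsl]
    rw [hcongr, ih]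
    -- the new, last position: slice is the whole of ws
    have hsl : PySem.List.slice (ws ++ [w]) none (some ((0 : Int) + (ws.length : Int)))
        = ws := by
      have : ((0 : Int) + (ws.length : Int)) = ((ws.length : Nat) : Int) := by ring
      rw [this, PySem.List.slice_to_natCast, List.take_left]
    have hofl : PySem.Set.ofList (ws ++ [w]) = PySem.Set.add (PySem.Set.ofList ws) w := by
      rw [PySem.Set.ofList_eq_foldl, PySem.Set.ofList_eq_foldl, List.foldl_append]
      rfl
    simp only [PySem.List.enumerate, List.foldl_cons, List.foldl_nil, hsl]
    by_cases h : w ∈ ws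
    · have h1 : ws.contains w = true := by simpa using h
      have hmem : w ∈ PySem.Set.ofList ws := (PySem.Set.mem_ofList ws w).mpr h
      have hadd : PySem.Set.add (PySem.Set.ofList ws) w = PySem.Set.ofList ws := by
        simp [PySem.Set.add, hmem]
      rw [h1, if_pos rfl, hofl, hadd]
    · have h1 : ws.contains w = false := by simpa using h
      have hmem : w ∉ PySem.Set.ofList ws := fun hx => h ((PySem.Set.mem_ofList ws w).mp hx)
      have hadd : PySem.Set.add (PySem.Set.ofList ws) w = PySem.Set.ofList ws ++ [w] := by
        simp [PySem.Set.add, hmem]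
      have hlen : PySem.Set.len (PySem.Set.ofList ws)
          = (((PySem.Set.ofList ws).length : Nat) : Int) := by
        simp [PySem.Set.len]
      rw [h1, hofl, hadd]
      simp only [Bool.false_eq_true, if_false]
      rw [hlen, pvInsert_mk_pairs _ _ hmem]

-- ===== VERDICT (by name: the statement is the Claim_ definition above) =====
theorem enumerate_words_spec : Claim_equal_enumerate_words := by
  intro L _
  show enumerate_words L = enumerate_words_alt L
  have hB : enumerate_words_alt L = (PySem.Dict.mk (pvPairs (PySem.Set.ofList L.flatten))).items := by
    unfold enumerate_words_alt
    simp only [show L.flatMap (fun ks => ks) = L.flatten by simp, pvComp]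
  rw [hB]
  unfold enumerate_words
  rw [← List.foldl_flatten]
  rw [show (PySem.Dict.empty : PySem.Dict String Int) = PySem.Dict.mk (pvPairs []) from rfl]
  rw [show (0 : Int) = (((List.length ([] : List String) : Nat)) : Int) by simp]
  rw [pvLoop]
  rw [PySem.Set.ofList_eq_foldl]
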